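-- pv_equiv track=rewrite | github.com/dlyczak3/Python_Visuals | Bubble_Chart.py | College
-- ===== SOURCE A (Python) =====
-- def College(name, short = True):
--     name = "".join(i.lower() for i in name if i.isalpha())
--     if name in ('a', 'collegeofdesign', 'cod', 'design'):
--         if short:
--             return 'COD'
--         else:
--             return 'College of Design'
--     if name in ('s', 'collegeofsciences', 'cos', 'sciences'):
--         if short:
--             return 'COS'
--         else:
--             return 'College of Sciences'
--     if name in ('c', 'collegeofcomputing', 'coc', 'computing'):
--         if short:
--             return 'COC'
--         else:
--             return 'College of Computing'
--     if name in ('e', 'collegeofengineering', 'coe', 'engineering'):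
--         if short:
--             return 'COE'
--         else:
--             return 'College of Engineering'
--     if name in ('m', 'schellercollegeofbusiness', 'scob', 'business'):
--         if short:
--             return 'SCOB'
--         else:
--             return 'Scheller College of Business'
--     if name in ('i', 'ivanallencollege', 'iac', 'ivan'):
--         if short:
--             return 'IAC'
--         else:
--             return 'Ivan Allen College'
--     else:
--         return 'Other'
-- ===== SOURCE B (Python) =====
-- # All 24 name variants flattened into one positional tuple: the group is
-- # recovered arithmetically as index // 4, then used to index parallel
-- # abbreviation / full-name tuples.
-- _VARIANTS = (
--     'a', 'collegeofdesign', 'cod', 'design',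
--     's', 'collegeofsciences', 'cos', 'sciences',
--     'c', 'collegeofcomputing', 'coc', 'computing',
--     'e', 'collegeofengineering', 'coe', 'engineering',
--     'm', 'schellercollegeofbusiness', 'scob', 'business',
--     'i', 'ivanallencollege', 'iac', 'ivan',
-- )
-- _SHORT = ('COD', 'COS', 'COC', 'COE', 'SCOB', 'IAC')
-- _LONG = ('College of Design', 'College of Sciences', 'College of Computing',
--          'College of Engineering', 'Scheller College of Business',
--          'Ivan Allen College')
--
--
-- def College(name, short=True):
--     name = "".join(i.lower() for i in name if i.isalpha())
--     try:
--         g = _VARIANTS.index(name) // 4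
--     except ValueError:
--         return 'Other'
--     return _SHORT[g] if short else _LONG[g]
-- ===== Notes on version B (the rewrite author's own statement) =====
-- stated objective: alternative
-- what changed: Replaces the six sequential membership-test branch blocks (each with its own short/long if) by a positional encoding: all 24 variants in one flat tuple, the group recovered arithmetically as index // 4, then used to index parallel abbreviation/full-name tuples, so there is no branching per college at all.
import Mathlib
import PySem

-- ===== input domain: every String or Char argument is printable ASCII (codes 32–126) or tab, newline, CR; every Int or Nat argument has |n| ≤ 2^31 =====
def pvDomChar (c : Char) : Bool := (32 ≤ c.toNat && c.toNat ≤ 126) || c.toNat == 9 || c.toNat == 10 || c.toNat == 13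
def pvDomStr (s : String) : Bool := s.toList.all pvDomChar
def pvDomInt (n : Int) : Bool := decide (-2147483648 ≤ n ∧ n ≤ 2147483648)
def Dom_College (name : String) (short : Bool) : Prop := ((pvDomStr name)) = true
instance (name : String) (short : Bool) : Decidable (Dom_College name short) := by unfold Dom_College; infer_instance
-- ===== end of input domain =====

-- B replaces A's six sequential membership branches by a positional encoding: one flat
-- variant list, group = index // 4, and parallel abbreviation/full-name lists (alternative).

-- normalization line shared verbatim by both Pythons: "".join(i.lower() for i in name if i.isalpha())
def pvNorm (name : String) : List Char :=
  PySem.Chars.join [] (((name.toList.filter PySem.Chars.isalpha).map PySem.Chars.lowerChar).map ([·]))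

-- ===== PORT A =====
def College (name : String) (short : Bool) : String :=
  let n := String.mk (pvNorm name)
  if n ∈ ["a", "collegeofdesign", "cod", "design"] then
    if short then "COD" else "College of Design"
  else if n ∈ ["s", "collegeofsciences", "cos", "sciences"] then
    if short then "COS" else "College of Sciences"
  else if n ∈ ["c", "collegeofcomputing", "coc", "computing"] then
    if short then "COC" else "College of Computing"
  else if n ∈ ["e", "collegeofengineering", "coe", "engineering"] then
    if short then "COE" else "College of Engineering"
  else if n ∈ ["m", "schellercollegeofbusiness", "scob", "business"] then
    if short then "SCOB" else "Scheller College of Business"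
  else if n ∈ ["i", "ivanallencollege", "iac", "ivan"] then
    if short then "IAC" else "Ivan Allen College"
  else "Other"

-- ===== PORT B =====
-- the module-level tuples of Source B
def collegeVariants : List String :=
  [ "a", "collegeofdesign", "cod", "design",
    "s", "collegeofsciences", "cos", "sciences",
    "c", "collegeofcomputing", "coc", "computing",
    "e", "collegeofengineering", "coe", "engineering",
    "m", "schellercollegeofbusiness", "scob", "business",
    "i", "ivanallencollege", "iac", "ivan" ]

def collegeShort : List String := ["COD", "COS", "COC", "COE", "SCOB", "IAC"]

def collegeLong : List String :=
  [ "College of Design", "College of Sciences", "College of Computing",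
    "College of Engineering", "Scheller College of Business", "Ivan Allen College" ]

def College_alt (name : String) (short : Bool) : String :=
  let n := String.mk (pvNorm name)
  match PySem.List.index? collegeVariants n with   -- try: _VARIANTS.index(name) / except ValueError
  | none => "Other"
  | some i =>
      let g := PySem.Int.floordiv (Int.ofNat i) 4
      -- _SHORT[g] / _LONG[g]: g is always in range (i < 24 so g < 6), so getD's default is unreachable
      (if short then PySem.List.pyGet? collegeShort g else PySem.List.pyGet? collegeLong g).getD ""

-- ===== PRECONDITION & SPEC =====
def Spec_College (name : String) (short : Bool) (out : String) : Prop := out = College_alt name short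
instance (name : String) (short : Bool) (out : String) : Decidable (Spec_College name short out) := by unfold Spec_College; infer_instance

-- ===== CLAIM (what is proved, stated in full; the proofs are below) =====
def Claim_equal_College : Prop := ∀ (name : String) (short : Bool), Dom_College name short → Spec_College name short (College name short)

-- ===== LEMMAS AND PROOFS =====

-- the core fact: for ANY normalized string n, A's branch chain equals B's index arithmetic
lemma chain_eq_positional (n : String) (short : Bool) :
    (if n ∈ ["a", "collegeofdesign", "cod", "design"] then
      if short then "COD" else "College of Design"
    else if n ∈ ["s", "collegeofsciences", "cos", "sciences"] then
      if short then "COS" else "College of Sciences"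
    else if n ∈ ["c", "collegeofcomputing", "coc", "computing"] then
      if short then "COC" else "College of Computing"
    else if n ∈ ["e", "collegeofengineering", "coe", "engineering"] then
      if short then "COE" else "College of Engineering"
    else if n ∈ ["m", "schellercollegeofbusiness", "scob", "business"] then
      if short then "SCOB" else "Scheller College of Business"
    else if n ∈ ["i", "ivanallencollege", "iac", "ivan"] then
      if short then "IAC" else "Ivan Allen College"
    else "Other")
    = (match PySem.List.index? collegeVariants n with
       | none => "Other"
       | some i =>
           (if short then PySem.List.pyGet? collegeShort (PySem.Int.floordiv (Int.ofNat i) 4)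
            else PySem.List.pyGet? collegeLong (PySem.Int.floordiv (Int.ofNat i) 4)).getD "") := by
  by_cases hmem : n ∈ collegeVariants
  · simp only [collegeVariants, List.mem_cons, List.not_mem_nil, or_false] at hmem
    rcases hmem with h|h|h|h|h|h|h|h|h|h|h|h|h|h|h|h|h|h|h|h|h|h|h|h <;>
      subst h <;> cases short <;> decide
  · have hnone : PySem.List.index? collegeVariants n = none :=
      (PySem.List.index?_eq_none_iff _ _).mpr hmem
    simp only [collegeVariants, List.mem_cons, List.not_mem_nil, or_false, not_or] at hmem
    obtain ⟨a1,a2,a3,a4,b1,b2,b3,b4,c1,c2,c3,c4,d1,d2,d3,d4,e1,e2,e3,e4,f1,f2,f3,f4⟩ := hmem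
    rw [hnone]
    simp [List.mem_cons, a1,a2,a3,a4,b1,b2,b3,b4,c1,c2,c3,c4,d1,d2,d3,d4,e1,e2,e3,e4,f1,f2,f3,f4]

-- ===== VERDICT (by name: the statement is the Claim_ definition above) =====
theorem College_spec : Claim_equal_College := by
  intro name short _
  unfold Spec_College College College_alt
  exact chain_eq_positional (String.mk (pvNorm name)) short
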